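-- pv_equiv track=rewrite | github.com/r4d10n/esp32p4-wifi-rtlsdr | test/test_afsk_loopback.py | frame_to_bits
-- ===== SOURCE A (Python) =====
-- AX25_FLAG = 0x7E
--
-- def frame_to_bits(frame):
--     """Convert AX.25 frame bytes to bit stream with HDLC bit stuffing."""
--     bits = []
--     # Preamble: multiple flags
--     for _ in range(40):  # 40 flag bytes = 333ms preamble
--         for bit in range(8):
--             bits.append((AX25_FLAG >> bit) & 1)
--
--     # Frame data with bit stuffing
--     ones_count = 0
--     for byte in frame:
--         for bit in range(8):
--             b = (byte >> bit) & 1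
--             bits.append(b)
--             if b == 1:
--                 ones_count += 1
--                 if ones_count == 5:
--                     bits.append(0)  # stuff zero
--                     ones_count = 0
--             else:
--                 ones_count = 0
--
--     # Closing flags
--     for _ in range(4):
--         for bit in range(8):
--             bits.append((AX25_FLAG >> bit) & 1)
--
--     return bits
-- ===== SOURCE B (Python) =====
-- AX25_FLAG = 0x7E
--
-- def frame_to_bits(frame):
--     """Convert AX.25 frame bytes to bit stream with HDLC bit stuffing."""
--     flag = [(AX25_FLAG >> i) & 1 for i in range(8)]
--     data = [(byte >> i) & 1 for byte in frame for i in range(8)]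
--     out = flag * 40
--     i, n = 0, len(data)
--     while i < n:
--         if data[i] == 0:
--             out.append(0)
--             i += 1
--         else:
--             # run-length: scan the whole run of ones, emit it with the
--             # stuffed zeros computed arithmetically (one per 5 ones)
--             j = i
--             while j < n and data[j] == 1:
--                 j += 1
--             k = j - i
--             out += [1, 1, 1, 1, 1, 0] * (k // 5) + [1] * (k % 5)
--             i = j
--     return out + flag * 4
-- ===== Notes on version B (the rewrite author's own statement) =====
-- stated objective: alternative
-- what changed: Replaces A's per-bit ones-counter state machine interleaved with byte conversion by a run-length algorithm: flatten the frame to LSB-first bits once, then scan runs of consecutive ones and emit each run with its k//5 stuffed zeros computed arithmetically ([1]*5+[0] repeated k//5 times plus k%5 ones); flag runs are a precomputed 8-bit pattern replicated 40 and 4 times.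
import Mathlib
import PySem

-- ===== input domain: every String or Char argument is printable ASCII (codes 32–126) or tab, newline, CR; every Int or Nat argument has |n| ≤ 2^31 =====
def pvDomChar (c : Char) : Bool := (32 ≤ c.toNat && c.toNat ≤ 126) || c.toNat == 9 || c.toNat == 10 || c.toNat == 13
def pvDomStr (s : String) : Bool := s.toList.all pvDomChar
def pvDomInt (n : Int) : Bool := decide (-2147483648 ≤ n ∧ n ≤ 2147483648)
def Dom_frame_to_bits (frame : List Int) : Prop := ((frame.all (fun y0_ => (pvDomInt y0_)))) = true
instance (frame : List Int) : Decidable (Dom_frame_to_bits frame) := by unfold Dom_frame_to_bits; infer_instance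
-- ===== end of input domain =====

-- B replaces A's per-bit ones-counter state machine by a run-length algorithm
-- (scan each run of ones, emit k//5 stuffed zeros arithmetically); same return value, no speed claim.

-- ===== PORT A =====
-- (byte >> bit) & 1 in Python = floor-division by 2^bit then floor-mod 2 (exact for negative ints too)
def pybit (byte bit : Int) : Int :=
  PySem.Int.mod (PySem.Int.floordiv byte (2 ^ bit.toNat)) 2

def frame_to_bits (frame : List Int) : List Int :=
  -- preamble: 40 flag bytes, bit by bit
  let bits : List Int :=
    (PySem.List.pyRange 0 40 1).foldl (fun bits _ =>
      (PySem.List.pyRange 0 8 1).foldl (fun bits bit => bits ++ [pybit 126 bit]) bits) []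
  -- frame data with bit stuffing (state = (bits, ones_count))
  let st :=
    frame.foldl (fun (st : List Int × Int) byte =>
      (PySem.List.pyRange 0 8 1).foldl (fun (st : List Int × Int) bit =>
        let b := pybit byte bit
        let bits := st.1 ++ [b]
        if b = 1 then
          if st.2 + 1 = 5 then (bits ++ [0], 0) else (bits, st.2 + 1)
        else (bits, 0)) st) (bits, 0)
  -- closing flags
  (PySem.List.pyRange 0 4 1).foldl (fun bits _ =>
    (PySem.List.pyRange 0 8 1).foldl (fun bits bit => bits ++ [pybit 126 bit]) bits) st.1

-- ===== PORT B =====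
-- the run-length stuffing scan of Source B: the outer `while i < n` index loop becomes a
-- structural recursion on the count of remaining elements (the fuel n - i), and the inner
-- `while data[j] == 1` scan is the takeWhile/dropWhile split of the remaining list
def stuffLoop (fuel : Nat) (data : List Int) : List Int :=
  match fuel, data with
  | _, [] => []
  | 0, _ => []  -- unreachable: fuel starts at the list length
  | fuel + 1, b :: rest =>
    if b = 0 then 0 :: stuffLoop fuel rest
    else
      let k := 1 + (rest.takeWhile (fun x => x = 1)).length
      (List.replicate (k / 5) ([1, 1, 1, 1, 1, 0] : List Int)).flatten
        ++ List.replicate (k % 5) (1 : Int)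
        ++ stuffLoop fuel (rest.dropWhile (fun x => x = 1))

def stuffRuns (data : List Int) : List Int := stuffLoop data.length data

def frame_to_bits_alt (frame : List Int) : List Int :=
  let flag : List Int := (PySem.List.pyRange 0 8 1).map (fun i => pybit 126 i)
  let data : List Int := frame.flatMap (fun byte => (PySem.List.pyRange 0 8 1).map (fun i => pybit byte i))
  (List.replicate 40 flag).flatten ++ stuffRuns data ++ (List.replicate 4 flag).flatten

-- ===== PRECONDITION & SPEC =====
def Spec_frame_to_bits (frame : List Int) (out : List Int) : Prop := out = frame_to_bits_alt frame
instance (frame : List Int) (out : List Int) : Decidable (Spec_frame_to_bits frame out) := by unfold Spec_frame_to_bits; infer_instance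

-- ===== CLAIM (what is proved, stated in full; the proofs are below) =====
def Claim_equal_frame_to_bits : Prop := ∀ (frame : List Int), Dom_frame_to_bits frame → Spec_frame_to_bits frame (frame_to_bits frame)

-- ===== LEMMAS AND PROOFS =====

-- A's stuffing step, as a named function
def stStep (st : List Int × Int) (b : Int) : List Int × Int :=
  if b = 1 then
    if st.2 + 1 = 5 then (st.1 ++ [b] ++ [0], 0) else (st.1 ++ [b], st.2 + 1)
  else (st.1 ++ [b], 0)

-- pure recursive description of A's stuffing: (output, final ones count)
def stuffP : List Int → Int → List Int × Int
  | [], k => ([], k)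
  | b :: rest, k =>
    if b = 1 then
      if k + 1 = 5 then
        let p := stuffP rest 0
        (b :: 0 :: p.1, p.2)
      else
        let p := stuffP rest (k + 1)
        (b :: p.1, p.2)
    else
      let p := stuffP rest 0
      (b :: p.1, p.2)

theorem foldl_stStep (l : List Int) : ∀ (acc : List Int) (k : Int),
    l.foldl stStep (acc, k) = (acc ++ (stuffP l k).1, (stuffP l k).2) := by
  induction l with
  | nil => intro acc k; simp [stuffP]
  | cons b rest ih =>
    intro acc k
    simp only [List.foldl_cons, stuffP, stStep]
    split_ifs <;> simp [ih]

theorem stuffP_append (xs : List Int) : ∀ (ys : List Int) (k : Int),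
    stuffP (xs ++ ys) k =
      ((stuffP xs k).1 ++ (stuffP ys (stuffP xs k).2).1, (stuffP ys (stuffP xs k).2).2) := by
  induction xs with
  | nil => intro ys k; simp [stuffP]
  | cons b rest ih =>
    intro ys k
    simp only [List.cons_append, stuffP]
    split_ifs with h1 h2 <;> simp [ih]

def bitsOf (byte : Int) : List Int := (PySem.List.pyRange 0 8 1).map (fun i => pybit byte i)

theorem frame_fold (frame : List Int) : ∀ (acc : List Int) (k : Int),
    frame.foldl (fun st byte => (bitsOf byte).foldl stStep st) (acc, k) =
      (acc ++ (stuffP (frame.flatMap bitsOf) k).1, (stuffP (frame.flatMap bitsOf) k).2) := by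
  induction frame with
  | nil => intro acc k; simp [stuffP]
  | cons byte rest ih =>
    intro acc k
    simp only [List.foldl_cons, foldl_stStep, List.flatMap_cons, stuffP_append, ih,
      List.append_assoc]

def flagPat : List Int := [0, 1, 1, 1, 1, 1, 1, 0]

theorem inner_flag (acc : List Int) :
    (PySem.List.pyRange 0 8 1).foldl (fun bits bit => bits ++ [pybit 126 bit]) acc
      = acc ++ flagPat := by
  have h : PySem.List.pyRange 0 8 1 = [0, 1, 2, 3, 4, 5, 6, 7] := by decide
  simp [h, List.foldl, flagPat]
  decide

theorem outer_flag (l : List Int) : ∀ (acc : List Int),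
    l.foldl (fun bits _ =>
        (PySem.List.pyRange 0 8 1).foldl (fun bits bit => bits ++ [pybit 126 bit]) bits) acc
      = acc ++ (List.replicate l.length flagPat).flatten := by
  induction l with
  | nil => intro acc; simp
  | cons x rest ih =>
    intro acc
    rw [List.foldl_cons, inner_flag, ih]
    simp [List.replicate_succ]

-- changing the incoming counter does not affect stuffP's output when the list does not start with a 1
theorem stuffP_fst_reset (d : List Int) (h : d.head? ≠ some 1) (k k' : Int) :
    (stuffP d k).1 = (stuffP d k').1 := by
  cases d with
  | nil => rfl
  | cons b t =>
    have hb : b ≠ 1 := by simpa using h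
    simp [stuffP, hb]

-- a short run of ones (m < 5): no stuffed zero, counter becomes m
theorem stuffP_ones_lt (m : Nat) (hm : m < 5) (d : List Int) :
    (stuffP (List.replicate m (1 : Int) ++ d) 0).1
      = List.replicate m (1 : Int) ++ (stuffP d (m : Int)).1 := by
  interval_cases m <;> norm_num [stuffP, List.replicate]

-- five ones: one stuffed zero, counter reset
theorem stuffP_ones_ge (m : Nat) (hm : 5 ≤ m) (d : List Int) :
    (stuffP (List.replicate m (1 : Int) ++ d) 0).1
      = [1, 1, 1, 1, 1, 0] ++ (stuffP (List.replicate (m - 5) (1 : Int) ++ d) 0).1 := by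
  obtain ⟨m', rfl⟩ : ∃ m', m = 5 + m' := ⟨m - 5, by omega⟩
  have h : List.replicate (5 + m') (1 : Int) ++ d
      = 1 :: 1 :: 1 :: 1 :: 1 :: (List.replicate m' (1 : Int) ++ d) := by
    simp [List.replicate_add, List.replicate]
  rw [h]
  norm_num [stuffP]

-- closed form for a full run of ones followed by a non-one
theorem stuffP_ones (m : Nat) (d : List Int) (h : d.head? ≠ some 1) :
    (stuffP (List.replicate m (1 : Int) ++ d) 0).1
      = (List.replicate (m / 5) ([1, 1, 1, 1, 1, 0] : List Int)).flatten
        ++ List.replicate (m % 5) (1 : Int) ++ (stuffP d 0).1 := by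
  induction m using Nat.strong_induction_on with
  | _ m ih =>
    by_cases hm : m < 5
    · rw [stuffP_ones_lt m hm d, stuffP_fst_reset d h (m : Int) 0]
      have h1 : m / 5 = 0 := by omega
      have h2 : m % 5 = m := by omega
      simp [h1, h2]
    · rw [stuffP_ones_ge m (by omega) d, ih (m - 5) (by omega)]
      have h1 : m / 5 = (m - 5) / 5 + 1 := by omega
      have h2 : m % 5 = (m - 5) % 5 := by omega
      rw [h1, h2, List.replicate_succ]
      simp

theorem takeWhile_ones (l : List Int) :
    l.takeWhile (fun x => x = 1) = List.replicate (l.takeWhile (fun x => x = 1)).length (1 : Int) := by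
  apply List.eq_replicate_of_mem
  intro b hb
  have := List.mem_takeWhile_imp hb
  simpa using this

theorem head?_dropWhile_ones (l : List Int) :
    (l.dropWhile (fun x => x = 1)).head? ≠ some 1 := by
  induction l with
  | nil => simp
  | cons b t ih =>
    by_cases hb : b = 1
    · simpa [hb] using ih
    · simp [hb]

-- the core equivalence: counter-based stuffing = run-length stuffing, on 0/1 bit lists
theorem stuff_eq_aux (n : Nat) : ∀ (data : List Int), data.length ≤ n →
    (∀ b ∈ data, b = 0 ∨ b = 1) → (stuffP data 0).1 = stuffLoop n data := by
  induction n with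
  | zero =>
    intro data hlen _
    have : data = [] := by cases data <;> simp_all
    subst this
    simp [stuffP, stuffLoop]
  | succ n ih =>
    intro data hlen hbits
    match data with
    | [] => simp [stuffP, stuffLoop]
    | b :: rest =>
      rcases hbits b (by simp) with hb | hb
      · subst hb
        have h0 : (stuffP ((0 : Int) :: rest) 0).1 = 0 :: (stuffP rest 0).1 := by
          norm_num [stuffP]
        conv_rhs => rw [stuffLoop]
        rw [h0, ih rest (by simp at hlen; omega) (fun x hx => hbits x (by simp [hx]))]
        simp
      · subst hb
        conv_rhs => rw [stuffLoop]
        simp only [if_neg (by norm_num : (1 : Int) ≠ 0)]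
        set t := rest.takeWhile (fun x => x = 1) with ht
        set dr := rest.dropWhile (fun x => x = 1) with hdr
        have hsplit : (1 : Int) :: rest = List.replicate (1 + t.length) (1 : Int) ++ dr := by
          have hr : rest = t ++ dr := by
            rw [ht, hdr]; exact (List.takeWhile_append_dropWhile).symm
          have ht1 : t = List.replicate t.length (1 : Int) := by
            conv_lhs => rw [ht, takeWhile_ones rest]
          calc (1 : Int) :: rest = (1 :: t) ++ dr := by rw [hr]; rfl
            _ = (1 :: List.replicate t.length (1 : Int)) ++ dr := by conv_lhs => rw [ht1]
            _ = List.replicate (1 + t.length) (1 : Int) ++ dr := by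
                  rw [Nat.add_comm, List.replicate_succ]
        rw [hsplit, stuffP_ones (1 + t.length) dr (by rw [hdr]; exact head?_dropWhile_ones rest)]
        have hdrlen : dr.length ≤ n := by
          have h1 := List.length_dropWhile_le (fun x : Int => decide (x = 1)) rest
          have h2 : rest.length + 1 ≤ n + 1 := by simpa using hlen
          rw [hdr]; omega
        have hdrmem : ∀ x ∈ dr, x = 0 ∨ x = 1 := by
          intro x hx
          have hxr : x ∈ rest := (List.dropWhile_sublist _).subset (by rw [← hdr]; exact hx)
          exact hbits x (List.mem_cons_of_mem _ hxr)
        rw [ih dr hdrlen hdrmem]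

theorem stuff_eq (data : List Int) (hbits : ∀ b ∈ data, b = 0 ∨ b = 1) :
    (stuffP data 0).1 = stuffRuns data :=
  stuff_eq_aux data.length data le_rfl hbits

-- each pybit is 0 or 1
theorem pybit_mem (byte bit : Int) : pybit byte bit = 0 ∨ pybit byte bit = 1 := by
  unfold pybit
  have h := PySem.Int.mod_eq_emod_of_pos (a := PySem.Int.floordiv byte (2 ^ bit.toNat)) (b := 2) (by norm_num)
  rw [h]
  omega

-- ===== VERDICT (by name: the statement is the Claim_ definition above) =====
theorem frame_to_bits_spec : Claim_equal_frame_to_bits := by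
  intro frame _
  show frame_to_bits frame = frame_to_bits_alt frame
  unfold frame_to_bits frame_to_bits_alt
  have hinner : (fun (st : List Int × Int) (byte : Int) =>
      (PySem.List.pyRange 0 8 1).foldl (fun (st : List Int × Int) bit =>
        let b := pybit byte bit
        let bits := st.1 ++ [b]
        if b = 1 then
          if st.2 + 1 = 5 then (bits ++ [0], 0) else (bits, st.2 + 1)
        else (bits, 0)) st) = (fun st byte => (bitsOf byte).foldl stStep st) := by
    funext st byte
    rw [bitsOf, List.foldl_map]
    rfl
  simp only [hinner]
  rw [outer_flag, outer_flag, frame_fold]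
  have hmem : ∀ b ∈ frame.flatMap bitsOf, b = 0 ∨ b = 1 := by
    intro b hb
    simp only [List.mem_flatMap, bitsOf, List.mem_map] at hb
    obtain ⟨byte, _, i, _, rfl⟩ := hb
    exact pybit_mem byte i
  rw [stuff_eq _ hmem]
  have h40 : (PySem.List.pyRange 0 40 1).length = 40 := by decide
  have h4 : (PySem.List.pyRange 0 4 1).length = 4 := by decide
  have hflag : ((PySem.List.pyRange 0 8 1).map (fun i => pybit 126 i)) = flagPat := by decide
  have hdata : frame.flatMap (fun byte => (PySem.List.pyRange 0 8 1).map (fun i => pybit byte i))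
      = frame.flatMap bitsOf := rfl
  simp only [h40, h4, hflag, hdata, List.nil_append, List.append_assoc]
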